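-- pv_equiv track=rewrite | github.com/clockworkpc/python-playground | code/module4/abstract_data_types.py | stack_operations
-- ===== SOURCE A (Python) =====
-- from typing import List
--
-- def stack_operations(cmds: List[str]) -> List[int]:
--     counter = 1
--     ary = []
--     for cmd in cmds:
--         if cmd in ["push", "enqueue"]:
--             ary.append(counter)
--             counter += 1
--         elif cmd in ["pop", "dequeue"]:
--             ary.pop()
--             counter -= 1
--     return ary
-- ===== SOURCE B (Python) =====
-- def stack_operations(cmds):
--     depth = 0
--     for cmd in cmds:
--         if cmd in ("push", "enqueue"):
--             depth += 1
--         elif cmd in ("pop", "dequeue"):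
--             if depth == 0:
--                 raise IndexError("pop from empty list")
--             depth -= 1
--     return list(range(1, depth + 1))
-- ===== Notes on version B (the rewrite author's own statement) =====
-- stated objective: simpler
-- what changed: B keeps no list at all during the loop: the invariant ary == [1..depth] makes a single integer depth counter sufficient, and the result is produced once at the end as list(range(1, depth+1)).
import Mathlib
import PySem

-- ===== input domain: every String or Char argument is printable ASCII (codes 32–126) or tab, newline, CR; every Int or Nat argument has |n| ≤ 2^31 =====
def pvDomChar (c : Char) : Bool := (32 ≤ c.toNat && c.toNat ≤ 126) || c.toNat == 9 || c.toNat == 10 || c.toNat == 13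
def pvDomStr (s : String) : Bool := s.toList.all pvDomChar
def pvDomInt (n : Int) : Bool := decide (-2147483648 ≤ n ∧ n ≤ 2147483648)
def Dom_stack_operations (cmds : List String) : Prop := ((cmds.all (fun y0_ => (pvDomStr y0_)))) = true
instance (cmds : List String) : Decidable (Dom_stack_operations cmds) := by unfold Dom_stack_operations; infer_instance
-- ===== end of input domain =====

-- B replaces A's growing list with a single integer depth counter (the invariant ary == [1..depth])
-- and materialises the result once at the end as range(1, depth+1); objective: simpler.

-- ===== PORT A =====
-- state: some (counter, ary); none = the IndexError from ary.pop() on an empty list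
def saStep (s : Option (Int × List Int)) (cmd : String) : Option (Int × List Int) :=
  match s with
  | none => none
  | some (counter, ary) =>
    if cmd = "push" ∨ cmd = "enqueue" then some (counter + 1, ary ++ [counter])
    else if cmd = "pop" ∨ cmd = "dequeue" then
      match PySem.List.pop? ary (-1) with
      | none => none
      | some (_, rest) => some (counter - 1, rest)
    else some (counter, ary)

def stack_operations (cmds : List String) : List Int :=
  match cmds.foldl saStep (some (1, [])) with
  | some (_, ary) => ary
  | none => []            -- unreachable under Pre_ (Python raises IndexError)

-- ===== PORT B =====
-- state: some depth; none = the explicit IndexError B raises on an unmatched pop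
def sbStep (s : Option Int) (cmd : String) : Option Int :=
  match s with
  | none => none
  | some d =>
    if cmd = "push" ∨ cmd = "enqueue" then some (d + 1)
    else if cmd = "pop" ∨ cmd = "dequeue" then
      if d = 0 then none else some (d - 1)
    else some d

def stack_operations_alt (cmds : List String) : List Int :=
  match cmds.foldl sbStep (some 0) with
  | some d => PySem.List.pyRange 1 (d + 1) 1
  | none => []            -- unreachable under Pre_ (Python raises IndexError)

-- ===== PRECONDITION & SPEC =====
def pvIsPush (c : String) : Bool := c = "push" || c = "enqueue"
def pvIsPop (c : String) : Bool := c = "pop" || c = "dequeue"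

-- Pre_ excludes exactly the inputs where some prefix has more pops than pushes: there A's
-- ary.pop() raises IndexError (and B raises IndexError too).
def Pre_stack_operations (cmds : List String) : Prop :=
  ∀ p ∈ cmds.inits, p.countP pvIsPop ≤ p.countP pvIsPush
instance (cmds : List String) : Decidable (Pre_stack_operations cmds) := by
  unfold Pre_stack_operations; infer_instance

def pvWitness_stack_operations : List String :=
  ["push", "push", "pop", "enqueue", "noop", "dequeue"]

def Spec_stack_operations (cmds : List String) (out : List Int) : Prop := out = stack_operations_alt cmds
instance (cmds : List String) (out : List Int) : Decidable (Spec_stack_operations cmds out) := by unfold Spec_stack_operations; infer_instance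

-- ===== CLAIM (what is proved, stated in full; the proofs are below) =====
def Claim_equal_stack_operations : Prop := ∀ (cmds : List String), Dom_stack_operations cmds → Pre_stack_operations cmds → Spec_stack_operations cmds (stack_operations cmds)

-- ===== LEMMAS AND PROOFS =====

lemma eraseIdx_append_singleton (ys : List Int) (y : Int) :
    (ys ++ [y]).eraseIdx ys.length = ys := by
  induction ys with
  | nil => rfl
  | cons a t ih => simp [ih]

lemma pop?_append_singleton (ys : List Int) (y : Int) :
    PySem.List.pop? (ys ++ [y]) (-1) = some (y, ys) := by
  simp [PySem.List.pop?, PySem.List.pyIdx?, eraseIdx_append_singleton]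

lemma foldl_none {α β : Type} (f : Option α → β → Option α)
    (h : ∀ b, f none b = none) (xs : List β) : xs.foldl f none = none := by
  induction xs with
  | nil => rfl
  | cons x xs ih => simp [h, ih]

-- Core invariant: A's state is always B's depth d paired as (d+1, [1..d]).
lemma foldl_inv (cmds : List String) : ∀ (d : Int), 0 ≤ d →
    cmds.foldl saStep (some (d + 1, PySem.List.pyRange 1 (d + 1) 1)) =
      (cmds.foldl sbStep (some d)).map
        (fun d' => (d' + 1, PySem.List.pyRange 1 (d' + 1) 1)) := by
  induction cmds with
  | nil => intro d _; rfl
  | cons c cs ih =>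
    intro d hd
    by_cases hpush : c = "push" ∨ c = "enqueue"
    · simp only [List.foldl_cons, saStep, sbStep, if_pos hpush]
      rw [← PySem.List.pyRange_one_succ_right (by omega : (1:Int) ≤ d + 1)]
      exact ih (d + 1) (by omega)
    · by_cases hpop : c = "pop" ∨ c = "dequeue"
      · by_cases hz : d = 0
        · subst hz
          simp only [List.foldl_cons, saStep, sbStep, if_neg hpush, if_pos hpop]
          rw [PySem.List.pyRange_one_eq_nil (by omega : (0:Int) + 1 ≤ 1)]
          simp only [PySem.List.pop?, PySem.List.pyIdx?]
          norm_num
          rw [foldl_none saStep (fun _ => rfl), foldl_none sbStep (fun _ => rfl)]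
          rfl
        · simp only [List.foldl_cons, saStep, sbStep, if_neg hpush, if_pos hpop, if_neg hz]
          rw [PySem.List.pyRange_one_succ_right (by omega : (1:Int) ≤ d),
              pop?_append_singleton]
          have := ih (d - 1) (by omega)
          rw [show (d - 1 + 1 : Int) = d by ring] at this
          simpa using this
      · simp only [List.foldl_cons, saStep, sbStep, if_neg hpush, if_neg hpop]
        exact ih d hd

-- ===== VERDICT (by name: the statement is the Claim_ definition above) =====
theorem stack_operations_spec : Claim_equal_stack_operations := by
  intro cmds _ _
  unfold Spec_stack_operations stack_operations stack_operations_alt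
  have h := foldl_inv cmds 0 le_rfl
  rw [PySem.List.pyRange_one_eq_nil (by omega : (0:Int) + 1 ≤ 1)] at h
  norm_num at h
  rw [h]
  cases cmds.foldl sbStep (some 0) with
  | none => rfl
  | some d => rfl
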